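-- pv_equiv track=rewrite | github.com/zhaotao789/2023_XUELANG | weld.py | NonDominatedSorting
-- ===== SOURCE A (Python) =====
-- def NonDominatedSorting(Function):
--     num=len(Function)
--     q_DominatedCount=[0 for i in range(num)]
--     for i in range(num):
--         for j in range(i+1,num):
--             x=(Function[i][0] <= Function[j][0]) & (Function[i][1] <= Function[j][1]) & (
--                     Function[i][2] <= Function[j][2]) & (Function[i][3] <= Function[j][3])
--             y= (Function[i][0] <= Function[j][0]) | (Function[i][1] <= Function[j][1]) | (
--                     Function[i][2] <= Function[j][2]) | (Function[i][3] <= Function[j][3])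
--             x1 = (Function[j][0] <= Function[i][0]) & (Function[j][1] <= Function[i][1]) & (
--                     Function[j][2] <= Function[i][2]) & (Function[j][3] <= Function[i][3])
--             y1 = (Function[j][0] <= Function[i][0]) | (Function[j][1] <= Function[i][1]) | (
--                     Function[j][2] <= Function[i][2]) | (Function[j][3] <= Function[i][3])
--             if x & y:
--                 q_DominatedCount[j]+=1
--             if  x1 & y1:
--                 q_DominatedCount[i]+=1
--
--     return q_DominatedCount
-- ===== SOURCE B (Python) =====
-- def NonDominatedSorting(Function):
--     pts = [(f[0], f[1], f[2], f[3]) for f in Function]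
--     mult = {}
--     for t in pts:
--         mult[t] = mult.get(t, 0) + 1
--     dom = {}
--     for t in mult:
--         c = -1
--         for s, ms in mult.items():
--             if s[0] <= t[0] and s[1] <= t[1] and s[2] <= t[2] and s[3] <= t[3]:
--                 c += ms
--         dom[t] = c
--     return [dom[t] for t in pts]
-- ===== Notes on version B (the rewrite author's own statement) =====
-- stated objective: faster
-- what changed: B collapses the points into a multiplicity table of distinct 4-tuples and computes one dominance count per distinct point (dominators of t = sum of multiplicities of points componentwise <= t, minus 1 for t itself), then maps the counts back, instead of A's triangular double loop that re-evaluates eight comparisons per pair and conditionally increments two counter cells.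
-- outside the precondition, e.g. on NonDominatedSorting([[0]]): A returns [0], B raises IndexError
import Mathlib
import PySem

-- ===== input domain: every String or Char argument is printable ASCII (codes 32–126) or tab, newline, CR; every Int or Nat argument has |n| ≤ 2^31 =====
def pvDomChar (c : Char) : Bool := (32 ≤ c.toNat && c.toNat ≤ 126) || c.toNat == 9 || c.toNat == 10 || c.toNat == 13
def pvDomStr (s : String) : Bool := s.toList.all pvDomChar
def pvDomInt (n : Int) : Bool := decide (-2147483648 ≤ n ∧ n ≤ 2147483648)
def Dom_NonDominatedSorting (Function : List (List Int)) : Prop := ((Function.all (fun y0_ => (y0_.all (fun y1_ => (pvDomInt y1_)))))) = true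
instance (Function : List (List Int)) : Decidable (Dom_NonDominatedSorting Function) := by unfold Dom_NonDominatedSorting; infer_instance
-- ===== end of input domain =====

-- B deduplicates the points and computes one dominance count per distinct 4-tuple (sum of
-- multiplicities of componentwise-smaller points, minus one for the point itself), instead of
-- A's triangular double loop incrementing two counter cells per pair; objective: faster (constant factor).

-- ===== PORT A =====
def NonDominatedSorting (Function : List (List Int)) : List Int :=
  let num : Int := PySem.List.len Function
  let q0 : List Int := (PySem.List.pyRange 0 num 1).map (fun _ => (0 : Int))
  (PySem.List.pyRange 0 num 1).foldl (fun q i =>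
    (PySem.List.pyRange (i + 1) num 1).foldl (fun q j =>
      let fi := PySem.List.pyGetD Function i []
      let fj := PySem.List.pyGetD Function j []
      let x := decide (PySem.List.pyGetD fi 0 0 ≤ PySem.List.pyGetD fj 0 0) &&
               decide (PySem.List.pyGetD fi 1 0 ≤ PySem.List.pyGetD fj 1 0) &&
               decide (PySem.List.pyGetD fi 2 0 ≤ PySem.List.pyGetD fj 2 0) &&
               decide (PySem.List.pyGetD fi 3 0 ≤ PySem.List.pyGetD fj 3 0)
      let y := decide (PySem.List.pyGetD fi 0 0 ≤ PySem.List.pyGetD fj 0 0) ||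
               decide (PySem.List.pyGetD fi 1 0 ≤ PySem.List.pyGetD fj 1 0) ||
               decide (PySem.List.pyGetD fi 2 0 ≤ PySem.List.pyGetD fj 2 0) ||
               decide (PySem.List.pyGetD fi 3 0 ≤ PySem.List.pyGetD fj 3 0)
      let x1 := decide (PySem.List.pyGetD fj 0 0 ≤ PySem.List.pyGetD fi 0 0) &&
                decide (PySem.List.pyGetD fj 1 0 ≤ PySem.List.pyGetD fi 1 0) &&
                decide (PySem.List.pyGetD fj 2 0 ≤ PySem.List.pyGetD fi 2 0) &&
                decide (PySem.List.pyGetD fj 3 0 ≤ PySem.List.pyGetD fi 3 0)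
      let y1 := decide (PySem.List.pyGetD fj 0 0 ≤ PySem.List.pyGetD fi 0 0) ||
                decide (PySem.List.pyGetD fj 1 0 ≤ PySem.List.pyGetD fi 1 0) ||
                decide (PySem.List.pyGetD fj 2 0 ≤ PySem.List.pyGetD fi 2 0) ||
                decide (PySem.List.pyGetD fj 3 0 ≤ PySem.List.pyGetD fi 3 0)
      let q := if x && y then PySem.List.pySetD q j (PySem.List.pyGetD q j 0 + 1) else q
      if x1 && y1 then PySem.List.pySetD q i (PySem.List.pyGetD q i 0 + 1) else q) q) q0

-- ===== PORT B =====
-- t = (f[0], f[1], f[2], f[3])   (pyGetD is exact here: Pre_ guarantees 4 ≤ len f)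
def pvKey (f : List Int) : Int × Int × Int × Int :=
  (PySem.List.pyGetD f 0 0, PySem.List.pyGetD f 1 0, PySem.List.pyGetD f 2 0, PySem.List.pyGetD f 3 0)

-- s[0] <= t[0] and s[1] <= t[1] and s[2] <= t[2] and s[3] <= t[3]
def pvLe4 (s t : Int × Int × Int × Int) : Bool :=
  decide (s.1 ≤ t.1) && decide (s.2.1 ≤ t.2.1) && decide (s.2.2.1 ≤ t.2.2.1) && decide (s.2.2.2 ≤ t.2.2.2)

def NonDominatedSorting_alt (Function : List (List Int)) : List Int :=
  let pts := Function.map pvKey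
  let mult := pts.foldl (fun d t => d.insert t (d.getD t 0 + 1)) PySem.Dict.empty
  let dom := mult.items.foldl (fun d p =>
      d.insert p.1 (mult.items.foldl (fun c q => if pvLe4 q.1 p.1 then c + q.2 else c) (-1)))
    PySem.Dict.empty
  pts.map (fun t => dom.getD t 0)

-- ===== PRECONDITION & SPEC =====
-- Pre_ excludes inputs with a row shorter than 4: on those A raises IndexError as soon as there
-- are two rows, and in the degenerate ≤ 1-row case A still returns while B raises IndexError.
def Pre_NonDominatedSorting (Function : List (List Int)) : Prop :=
  ∀ f ∈ Function, 4 ≤ f.length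
instance (Function : List (List Int)) : Decidable (Pre_NonDominatedSorting Function) := by
  unfold Pre_NonDominatedSorting; infer_instance

def pvWitness_NonDominatedSorting : List (List Int) := [[1, 2, 3, 4], [0, 2, 3, 4]]

def Spec_NonDominatedSorting (Function : List (List Int)) (out : List Int) : Prop :=
  out = NonDominatedSorting_alt Function
instance (Function : List (List Int)) (out : List Int) : Decidable (Spec_NonDominatedSorting Function out) := by
  unfold Spec_NonDominatedSorting; infer_instance

-- ===== CLAIM (what is proved, stated in full; the proofs are below) =====
def Claim_equal_NonDominatedSorting : Prop := ∀ (Function : List (List Int)), Dom_NonDominatedSorting Function → Pre_NonDominatedSorting Function → Spec_NonDominatedSorting Function (NonDominatedSorting Function)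

-- ===== LEMMAS AND PROOFS =====

-- the point of row m (all proofs are phrased through this)
def pvP (Function : List (List Int)) (m : Nat) : Int × Int × Int × Int := pvKey (Function.getD m [])

-- q[t] += 1  (Nat index)
def pvStepN (q : List Int) (t : Nat) : List Int := q.set t (q.getD t 0 + 1)

-- one iteration of A's inner loop, Nat indices, abstract relation R and point map P
def pvBody (R : (Int × Int × Int × Int) → (Int × Int × Int × Int) → Bool)
    (P : Nat → Int × Int × Int × Int) (i : Nat) (q : List Int) (j : Nat) : List Int :=
  let q1 := if R (P i) (P j) then pvStepN q j else q
  if R (P j) (P i) then pvStepN q1 i else q1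

-- A's inner index list for outer index i
def pvJ (n i : Nat) : List Nat := (List.range (n - (i + 1))).map (fun k => i + 1 + k)

lemma pv_band_bor (a b c d : Bool) : ((a && b && c && d) && (a || b || c || d)) = (a && b && c && d) := by
  cases a <;> cases b <;> cases c <;> cases d <;> rfl

lemma pvLe4_refl (t : Int × Int × Int × Int) : pvLe4 t t = true := by simp [pvLe4]

lemma pv_length_stepN (q : List Int) (t : Nat) : (pvStepN q t).length = q.length := by
  simp [pvStepN]

lemma pv_getD_stepN (q : List Int) (t k : Nat) (ht : t < q.length) :
    (pvStepN q t).getD k 0 = if k = t then q.getD k 0 + 1 else q.getD k 0 := by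
  by_cases h : k = t
  · subst h
    simp [pvStepN, List.getD_eq_getElem?_getD, List.getElem?_set_self, ht]
  · simp [pvStepN, List.getD_eq_getElem?_getD, List.getElem?_set_ne (by omega : t ≠ k), h]

lemma pv_length_body (R P i) (q : List Int) (j : Nat) : (pvBody R P i q j).length = q.length := by
  unfold pvBody
  split <;> split <;> simp [pv_length_stepN]

lemma pv_getD_body (R P) (i j k : Nat) (q : List Int) (hi : i < q.length) (hj : j < q.length) :
    (pvBody R P i q j).getD k 0 =
      q.getD k 0 + (if R (P i) (P j) ∧ j = k then 1 else 0)
        + (if R (P j) (P i) ∧ i = k then 1 else 0) := by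
  unfold pvBody
  by_cases h1 : R (P i) (P j) <;> by_cases h2 : R (P j) (P i) <;>
      simp only [h1, h2, Bool.false_eq_true, if_true, if_false, true_and, false_and, ite_true, ite_false]
  · rw [pv_getD_stepN _ i k (by rw [pv_length_stepN]; exact hi), pv_getD_stepN _ j k hj]
    split_ifs <;> omega
  · rw [pv_getD_stepN _ j k hj]
    split_ifs <;> omega
  · rw [pv_getD_stepN _ i k hi]
    split_ifs <;> omega
  · omega

lemma pv_length_inner (R P i) (js : List Nat) (q : List Int) :
    (js.foldl (pvBody R P i) q).length = q.length := by
  induction js generalizing q with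
  | nil => rfl
  | cons j js ih => simp [List.foldl_cons, ih, pv_length_body]

lemma pv_getD_inner (R P) (i : Nat) (js : List Nat) (q : List Int) (k : Nat)
    (hi : i < q.length) (hjs : ∀ j ∈ js, j < q.length) :
    (js.foldl (pvBody R P i) q).getD k 0 =
      q.getD k 0 + (if R (P i) (P k) then (js.count k : Int) else 0)
        + (if i = k then (js.countP (fun j => R (P j) (P k)) : Int) else 0) := by
  induction js generalizing q with
  | nil => simp
  | cons j js ih =>
    have hj : j < q.length := hjs j (by simp)
    rw [List.foldl_cons, ih _ (by rw [pv_length_body]; exact hi)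
      (fun x hx => by rw [pv_length_body]; exact hjs x (by simp [hx]))]
    rw [pv_getD_body R P i j k q hi hj]
    rw [List.count_cons, List.countP_cons]
    by_cases hjk : j = k <;> by_cases hik : i = k <;>
      by_cases h1 : R (P i) (P k) <;> by_cases h2 : R (P j) (P k) <;>
      simp_all <;> push_cast <;> ring

lemma pv_length_outer (R P) (is : List Nat) (J : Nat → List Nat) (q : List Int) :
    (is.foldl (fun q i => (J i).foldl (pvBody R P i) q) q).length = q.length := by
  induction is generalizing q with
  | nil => rfl
  | cons i is ih => simp [List.foldl_cons, ih, pv_length_inner]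

lemma pv_getD_outer (R P) (is : List Nat) (J : Nat → List Nat) (q : List Int) (k : Nat)
    (h : ∀ i ∈ is, i < q.length ∧ ∀ j ∈ J i, j < q.length) :
    (is.foldl (fun q i => (J i).foldl (pvBody R P i) q) q).getD k 0 =
      q.getD k 0 + (is.map (fun i =>
        (if R (P i) (P k) then ((J i).count k : Int) else 0)
          + (if i = k then ((J i).countP (fun j => R (P j) (P k)) : Int) else 0))).sum := by
  induction is generalizing q with
  | nil => simp
  | cons i is ih =>
    obtain ⟨hi, hJ⟩ := h i (by simp)
    rw [List.foldl_cons, ih _ (fun x hx => by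
      rw [pv_length_inner]; exact h x (by simp [hx]))]
    rw [pv_getD_inner R P i (J i) q k hi hJ]
    simp only [List.map_cons, List.sum_cons]
    ring

-- sum of an equality indicator over a Nodup list
lemma pv_sum_ind {α : Type} [DecidableEq α] (L : List α) (x : α) (hL : L.Nodup) :
    (L.map (fun s => if s = x then (1 : Int) else 0)).sum = if x ∈ L then 1 else 0 := by
  induction L with
  | nil => simp
  | cons a L ih =>
    rcases List.nodup_cons.mp hL with ⟨ha, hL'⟩
    by_cases h : a = x
    · subst h
      simp [ih hL', ha]
    · simp [h, ih hL', Ne.symm h]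

-- Σ_{s ∈ S, p s} count s xs = countP p xs, for S ⊇ xs Nodup
lemma pv_sum_count {α : Type} [BEq α] [LawfulBEq α] [DecidableEq α] (xs S : List α) (p : α → Bool)
    (hS : S.Nodup) (hsub : ∀ x ∈ xs, x ∈ S) :
    ((S.filter p).map (fun s => (xs.count s : Int))).sum = (xs.countP p : Int) := by
  induction xs with
  | nil => simp
  | cons x xs ih =>
    have hx : x ∈ S := hsub x (by simp)
    have hsub' : ∀ y ∈ xs, y ∈ S := fun y hy => hsub y (by simp [hy])
    have hcnt : ∀ s, ((x :: xs).count s : Int) = (xs.count s : Int) + (if s = x then 1 else 0) := by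
      intro s
      rw [List.count_cons]
      push_cast
      by_cases h : s = x
      · simp [h]
      · simp [h, Ne.symm h]
    calc ((S.filter p).map (fun s => ((x :: xs).count s : Int))).sum
        = ((S.filter p).map (fun s => (xs.count s : Int) + (if s = x then 1 else 0))).sum := by
          exact congrArg List.sum (List.map_congr_left (fun s _ => hcnt s))
      _ = ((S.filter p).map (fun s => (xs.count s : Int))).sum
            + ((S.filter p).map (fun s => if s = x then (1 : Int) else 0)).sum := by
          rw [← List.sum_map_add]
      _ = (xs.countP p : Int) + (if p x then 1 else 0) := by
          rw [ih hsub', pv_sum_ind _ _ (hS.filter p)]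
          congr 1
          by_cases h : p x <;> simp [List.mem_filter, hx, h]
      _ = ((x :: xs).countP p : Int) := by
          rw [List.countP_cons]
          by_cases h : p x <;> simp [h]

-- getD of a dict built by inserting (key, g key) for every key in L
lemma pv_dict_getD {κ ν : Type} [BEq κ] [LawfulBEq κ] [DecidableEq κ] (L : List κ) (g : κ → ν)
    (d : PySem.Dict κ ν) (t : κ) (d0 : ν) :
    (L.foldl (fun d s => d.insert s (g s)) d).getD t d0 = if t ∈ L then g t else d.getD t d0 := by
  induction L generalizing d with
  | nil => simp
  | cons s L ih =>
    rw [List.foldl_cons, ih]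
    by_cases hmem : t ∈ L
    · simp [hmem]
    · by_cases h : t = s
      · subst h
        simp [hmem, PySem.Dict.getD_insert_self]
      · simp only [hmem, List.mem_cons, h, or_self, if_false, ite_false]
        exact PySem.Dict.getD_insert_of_ne d (g s) d0 h

-- countP over a list as countP over its index range
lemma pv_countP_range {α : Type} (l : List α) (p : α → Bool) (d : α) :
    (l.countP p : Int) = ((List.range l.length).countP (fun m => p (l.getD m d)) : Int) := by
  induction l with
  | nil => simp
  | cons x l ih =>
    have h3 : List.countP ((fun m => p ((x :: l).getD m d)) ∘ Nat.succ) (List.range l.length)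
        = List.countP (fun m => p (l.getD m d)) (List.range l.length) :=
      List.countP_congr (fun m _ => by
        simp [Function.comp, Nat.succ_eq_add_one, List.getD_cons_succ])
    rw [List.length_cons, List.range_succ_eq_map, List.countP_cons, List.countP_cons,
      List.countP_map, h3]
    rw [List.getD_cons_zero]
    push_cast
    rw [← ih]
    try ring
    
lemma pv_getD_map_key (Function : List (List Int)) (m : Nat) :
    (Function.map pvKey).getD m (pvKey []) = pvKey (Function.getD m []) := by
  by_cases h : m < Function.length
  · rw [List.getD_eq_getElem _ _ (by simpa using h), List.getD_eq_getElem _ _ h]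
    simp
  · rw [List.getD_eq_default _ _ (by simpa using (Nat.le_of_not_lt h)),
      List.getD_eq_default _ _ (Nat.le_of_not_lt h)]

-- membership / count in the inner index list
lemma pv_mem_J (n i k : Nat) : k ∈ pvJ n i ↔ i < k ∧ k < n := by
  constructor
  · intro hk
    rcases List.mem_map.mp hk with ⟨t, ht, rfl⟩
    have := List.mem_range.mp ht
    omega
  · intro ⟨h1, h2⟩
    exact List.mem_map.mpr ⟨k - (i + 1), List.mem_range.mpr (by omega), by omega⟩

lemma pv_nodup_J (n i : Nat) : (pvJ n i).Nodup :=
  List.Nodup.map (fun a b h => by omega) (List.nodup_range)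

lemma pv_count_J (n i k : Nat) : (pvJ n i).count k = if i < k ∧ k < n then 1 else 0 := by
  by_cases h : i < k ∧ k < n
  · simp [h, List.count_eq_one_of_mem (pv_nodup_J n i) ((pv_mem_J n i k).mpr h)]
  · simp [h, List.count_eq_zero_of_not_mem (fun hm => h ((pv_mem_J n i k).mp hm))]

-- sum of (if i = k then C i else 0) over a Nodup list containing k
lemma pv_sum_zero {C : Nat → Int} (L : List Nat) (k : Nat) (hk : k ∉ L) :
    (L.map (fun i => if i = k then C i else 0)).sum = 0 := by
  induction L with
  | nil => simp
  | cons a L ih =>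
    simp only [List.mem_cons, not_or] at hk
    have hne : a ≠ k := fun h => hk.1 h.symm
    simp [hne, ih hk.2]

lemma pv_sum_single {C : Nat → Int} (L : List Nat) (k : Nat) (hL : L.Nodup) (hk : k ∈ L) :
    (L.map (fun i => if i = k then C i else 0)).sum = C k := by
  induction L with
  | nil => simp at hk
  | cons a L ih =>
    rcases List.nodup_cons.mp hL with ⟨ha, hL'⟩
    rcases List.mem_cons.mp hk with h | h
    · subst h
      simp [pv_sum_zero L k ha]
    · have hne : a ≠ k := fun hak => ha (hak ▸ h)
      simp [hne, ih hL' h]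

-- the final counting identity
lemma pv_split_count (p : Nat → Bool) (n k : Nat) (hk : k < n) (hpk : p k = true) :
    ((List.range n).countP (fun i => p i && decide (i < k)) : Int)
      + ((List.range (n - (k + 1))).countP (fun t => p (k + 1 + t)) : Int)
      = ((List.range n).countP p : Int) - 1 := by
  have hn : n = (k + 1) + (n - (k + 1)) := by omega
  have hsplit : List.range n = List.range (k + 1) ++ (List.range (n - (k + 1))).map ((k + 1) + ·) := by
    conv_lhs => rw [hn, List.range_add]
  have hr1 : List.range (k + 1) = List.range k ++ [k] := List.range_succ
  have hcomp : (p ∘ (fun x => (k + 1) + x)) = (fun t => p (k + 1 + t)) := rfl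
  have e1 : (List.range n).countP p
      = (List.range k).countP p + 1
        + (List.range (n - (k + 1))).countP (fun t => p (k + 1 + t)) := by
    rw [hsplit, List.countP_append, hr1, List.countP_append, List.countP_map, hcomp]
    simp only [List.countP_cons, List.countP_nil, hpk, if_true]
    try omega
  have h0 : (List.range (n - (k + 1))).countP
      ((fun i => p i && decide (i < k)) ∘ (fun x => (k + 1) + x)) = 0 := by
    refine List.countP_eq_zero.mpr (fun t _ => ?_)
    simp only [Function.comp]
    have : ¬ ((k + 1) + t < k) := by omega
    simp [this]
  have h1 : (List.range k).countP (fun i => p i && decide (i < k)) = (List.range k).countP p := by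
    refine List.countP_congr (fun i hi => ?_)
    have := List.mem_range.mp hi
    simp [this]
  have e2 : (List.range n).countP (fun i => p i && decide (i < k)) = (List.range k).countP p := by
    rw [hsplit, List.countP_append, hr1, List.countP_append, List.countP_map, h0, h1]
    have : ¬ (k < k) := by omega
    simp [List.countP_cons, this]
  rw [e1, e2]
  push_cast
  ring

-- ===== A's inner-loop body, named for the proofs (definitionally the port's body) =====
def pvABody (Function : List (List Int)) (i : Int) (q : List Int) (j : Int) : List Int :=
  let fi := PySem.List.pyGetD Function i []
  let fj := PySem.List.pyGetD Function j []
  let x := decide (PySem.List.pyGetD fi 0 0 ≤ PySem.List.pyGetD fj 0 0) &&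
           decide (PySem.List.pyGetD fi 1 0 ≤ PySem.List.pyGetD fj 1 0) &&
           decide (PySem.List.pyGetD fi 2 0 ≤ PySem.List.pyGetD fj 2 0) &&
           decide (PySem.List.pyGetD fi 3 0 ≤ PySem.List.pyGetD fj 3 0)
  let y := decide (PySem.List.pyGetD fi 0 0 ≤ PySem.List.pyGetD fj 0 0) ||
           decide (PySem.List.pyGetD fi 1 0 ≤ PySem.List.pyGetD fj 1 0) ||
           decide (PySem.List.pyGetD fi 2 0 ≤ PySem.List.pyGetD fj 2 0) ||
           decide (PySem.List.pyGetD fi 3 0 ≤ PySem.List.pyGetD fj 3 0)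
  let x1 := decide (PySem.List.pyGetD fj 0 0 ≤ PySem.List.pyGetD fi 0 0) &&
            decide (PySem.List.pyGetD fj 1 0 ≤ PySem.List.pyGetD fi 1 0) &&
            decide (PySem.List.pyGetD fj 2 0 ≤ PySem.List.pyGetD fi 2 0) &&
            decide (PySem.List.pyGetD fj 3 0 ≤ PySem.List.pyGetD fi 3 0)
  let y1 := decide (PySem.List.pyGetD fj 0 0 ≤ PySem.List.pyGetD fi 0 0) ||
            decide (PySem.List.pyGetD fj 1 0 ≤ PySem.List.pyGetD fi 1 0) ||
            decide (PySem.List.pyGetD fj 2 0 ≤ PySem.List.pyGetD fi 2 0) ||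
            decide (PySem.List.pyGetD fj 3 0 ≤ PySem.List.pyGetD fi 3 0)
  let q := if x && y then PySem.List.pySetD q j (PySem.List.pyGetD q j 0 + 1) else q
  if x1 && y1 then PySem.List.pySetD q i (PySem.List.pyGetD q i 0 + 1) else q

lemma pv_A_unfold (Function : List (List Int)) :
    NonDominatedSorting Function =
      (PySem.List.pyRange 0 (PySem.List.len Function) 1).foldl (fun q i =>
        (PySem.List.pyRange (i + 1) (PySem.List.len Function) 1).foldl (pvABody Function i) q)
        ((PySem.List.pyRange 0 (PySem.List.len Function) 1).map (fun _ => (0 : Int))) := rfl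

lemma pv_ABody_eq (Function : List (List Int)) (m j : Nat) (q : List Int) :
    pvABody Function (m : Int) q (j : Int) = pvBody pvLe4 (pvP Function) m q j := by
  unfold pvABody pvBody pvStepN pvP pvKey pvLe4
  simp only [PySem.List.pyGetD_natCast, PySem.List.pySetD_natCast, pv_band_bor]

lemma pv_range_zero (n : Nat) :
    PySem.List.pyRange 0 (n : Int) 1 = (List.range n).map (fun (m : Nat) => (m : Int)) := by
  rw [PySem.List.pyRange_one]
  have h : (((n : Int)) - 0).toNat = n := by omega
  rw [h]
  exact List.map_congr_left (fun t _ => by omega)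

lemma pv_range_J (n m : Nat) :
    PySem.List.pyRange ((m : Int) + 1) (n : Int) 1 = (pvJ n m).map (fun (j : Nat) => (j : Int)) := by
  rw [PySem.List.pyRange_one]
  have h : (((n : Int)) - ((m : Int) + 1)).toNat = n - (m + 1) := by omega
  rw [h]
  unfold pvJ
  rw [List.map_map]
  exact List.map_congr_left (fun t _ => by simp only [Function.comp_apply]; push_cast; ring)

lemma pv_getD_zeros {α : Type} (M : List α) (k : Nat) :
    (M.map (fun _ => (0 : Int))).getD k 0 = 0 := by
  induction M generalizing k with
  | nil => simp
  | cons a M ih => cases k <;> simp [ih]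

lemma pv_sum_ite (l : List Nat) (p : Nat → Bool) :
    (l.map (fun x => if p x then (1 : Int) else 0)).sum = (l.countP p : Int) := by
  induction l with
  | nil => simp
  | cons a l ih =>
    rw [List.map_cons, List.sum_cons, ih, List.countP_cons]
    by_cases h : p a <;> simp [h] <;> push_cast <;> omega

lemma pv_A_nat (Function : List (List Int)) :
    NonDominatedSorting Function =
      (List.range Function.length).foldl
        (fun q m => (pvJ Function.length m).foldl (pvBody pvLe4 (pvP Function) m) q)
        (((List.range Function.length).map (fun (m : Nat) => (m : Int))).map
          (fun _ => (0 : Int))) := by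
  rw [pv_A_unfold]
  simp only [PySem.List.len_eq]
  rw [pv_range_zero, List.foldl_map]
  refine PySem.List.foldl_congr_mem _ _ _ _ (fun q m _ => ?_)
  rw [pv_range_J Function.length m, List.foldl_map]
  exact PySem.List.foldl_congr_mem _ _ _ _ (fun acc j _ => pv_ABody_eq Function m j acc)

-- ===== characterisation of port B =====
lemma pv_alt_char (Function : List (List Int)) (k : Nat) (hk : k < Function.length) :
    (NonDominatedSorting_alt Function).getD k 0 =
      ((Function.map pvKey).countP (fun s => pvLe4 s (pvP Function k)) : Int) - 1 := by
  have hk2 : k < (Function.map pvKey).length := by simpa using hk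
  simp only [NonDominatedSorting_alt]
  rw [PySem.Dict.foldl_insert_getD_add_one_eq_counter]
  rw [PySem.Dict.items_counter]
  have hmap : ∀ (f : (Int × Int × Int × Int) → Int),
      (((Function.map pvKey).map f)).getD k 0 = f ((Function.map pvKey).getD k (pvKey [])) := by
    intro f
    rw [List.getD_eq_getElem _ _ (by simpa using hk2), List.getElem_map,
      List.getD_eq_getElem _ _ hk2]
  rw [hmap]
  simp only [List.foldl_map]
  rw [pv_dict_getD]
  have hmem : (Function.map pvKey).getD k (pvKey []) ∈ PySem.Set.ofList (Function.map pvKey) := by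
    rw [List.getD_eq_getElem _ _ hk2]
    exact (PySem.Set.mem_ofList _ _).mpr (List.getElem_mem hk2)
  rw [if_pos hmem]
  rw [PySem.List.foldl_if_eq_foldl_filter]
  rw [PySem.List.foldl_add (g := fun s => ((Function.map pvKey).count s : Int))]
  rw [pv_sum_count (Function.map pvKey) (PySem.Set.ofList (Function.map pvKey)) _
    (PySem.Set.nodup_ofList _) (fun x hx => (PySem.Set.mem_ofList _ _).mpr hx)]
  have hPk : (List.map pvKey Function).getD k (pvKey []) = pvP Function k :=
    pv_getD_map_key Function k
  rw [hPk]
  ring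

lemma pv_alt_length (Function : List (List Int)) :
    (NonDominatedSorting_alt Function).length = Function.length := by
  simp [NonDominatedSorting_alt]

-- ===== characterisation of port A =====
lemma pv_a_char (Function : List (List Int)) (k : Nat) (hk : k < Function.length) :
    (NonDominatedSorting Function).getD k 0 =
      ((List.range Function.length).countP
        (fun m => pvLe4 (pvP Function m) (pvP Function k)) : Int) - 1 := by
  rw [pv_A_nat]
  have hlen : (((List.range Function.length).map (fun (m : Nat) => (m : Int))).map
      (fun _ => (0 : Int))).length = Function.length := by simp
  rw [pv_getD_outer pvLe4 (pvP Function) (List.range Function.length) (pvJ Function.length) _ k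
      (fun i hi => ⟨by rw [hlen]; exact List.mem_range.mp hi,
        fun j hj => by rw [hlen]; exact ((pv_mem_J _ _ _).mp hj).2⟩)]
  rw [pv_getD_zeros]
  rw [List.sum_map_add]
  have e1 : ((List.range Function.length).map (fun i =>
      if pvLe4 (pvP Function i) (pvP Function k) then ((pvJ Function.length i).count k : Int)
      else 0)).sum
      = ((List.range Function.length).countP
          (fun i => pvLe4 (pvP Function i) (pvP Function k) && decide (i < k)) : Int) := by
    have hcg : ∀ i ∈ List.range Function.length,
        (if pvLe4 (pvP Function i) (pvP Function k) then ((pvJ Function.length i).count k : Int)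
          else 0)
        = (if (pvLe4 (pvP Function i) (pvP Function k) && decide (i < k)) then (1 : Int)
            else 0) := by
      intro i _
      rw [pv_count_J]
      by_cases h1 : pvLe4 (pvP Function i) (pvP Function k) <;> by_cases h2 : i < k <;>
        simp [h1, h2, hk]
    rw [List.map_congr_left hcg, pv_sum_ite]
  have e2 : ((List.range Function.length).map (fun i => if i = k then
      ((pvJ Function.length i).countP (fun j => pvLe4 (pvP Function j) (pvP Function k)) : Int)
      else 0)).sum
      = ((List.range (Function.length - (k + 1))).countP
          (fun t => pvLe4 (pvP Function (k + 1 + t)) (pvP Function k)) : Int) := by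
    rw [pv_sum_single (List.range Function.length) k List.nodup_range (List.mem_range.mpr hk)]
    unfold pvJ
    rw [List.countP_map]
    have hc : ((fun j => pvLe4 (pvP Function j) (pvP Function k)) ∘ fun t => k + 1 + t)
        = (fun t => pvLe4 (pvP Function (k + 1 + t)) (pvP Function k)) := rfl
    rw [hc]
  rw [e1, e2, pv_split_count _ _ _ hk (pvLe4_refl _)]
  ring

lemma pv_a_length (Function : List (List Int)) :
    (NonDominatedSorting Function).length = Function.length := by
  rw [pv_A_nat, pv_length_outer]
  simp

-- ===== VERDICT (by name: the statement is the Claim_ definition above) =====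
theorem NonDominatedSorting_spec : Claim_equal_NonDominatedSorting := by
  intro Function _ _
  unfold Spec_NonDominatedSorting
  apply List.ext_getElem
  · rw [pv_a_length, pv_alt_length]
  · intro k hk1 hk2
    have hk : k < Function.length := by rw [pv_a_length] at hk1; exact hk1
    rw [← List.getD_eq_getElem _ 0 hk1, ← List.getD_eq_getElem _ 0 hk2]
    rw [pv_a_char Function k hk, pv_alt_char Function k hk]
    rw [pv_countP_range (Function.map pvKey) (fun s => pvLe4 s (pvP Function k)) (pvKey [])]
    have hlen2 : (Function.map pvKey).length = Function.length := by simp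
    rw [hlen2]
    have hcg : (List.range Function.length).countP
        (fun m => pvLe4 ((Function.map pvKey).getD m (pvKey [])) (pvP Function k))
        = (List.range Function.length).countP
            (fun m => pvLe4 (pvP Function m) (pvP Function k)) :=
      List.countP_congr (fun m _ => by rw [pv_getD_map_key]; rfl)
    rw [hcg]
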